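-- pv_equiv track=rewrite | github.com/stephenmuller/Trap-Scoring | trap_scorekeeping/logic.py | dict_of_misses
-- ===== SOURCE A (Python) =====
-- import string
--
-- def dict_of_misses(raw_scores):
--     """Makes a dictionary mapping target number to amount of times missed
--
--     >>> create_user('test', 'test', 'test')
--     >>> create_new_gun_model('beretta', 'a400', '12', 28, 'shell catcher')
--     >>> create_new_shells_model('remmington', 'gameloads', '7.5', '1oz', 1290)
--     >>> create_new_round(User.objects.get(id=1), 'abr', '1997-07-16T19:22:30+01:00',
--     ... 'portland gun club', models.Shotgun.objects.get(id=1), models.Shells.objects.get(id=1), '1',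
--     ... 'no excuses!!')
--     >>> a ={'x': 0, 'q': 0, 'g': 0, 'u': 0, 'h': 0, 'i': 0, 'p': 0, 'r': 1, 'w': 0, 's': 0, 'd': 0, 'm': 0, 'c': 0, 'v': 0, 'z': 0, 'o': 0, 't': 0, 'e': 0, 'j': 0, 'a': 1, 'n': 0, 'b': 1, 'k': 0, 'l': 0, 'y': 0, 'f': 0}
--     >>> a == dict_of_misses(list_of_raw_scores(models.Round.objects.all()))
--     True
--     """
--     split_scores = [list(score) for score in raw_scores]
--     target_hit_miss_values = {}
--     for index, letter in enumerate(string.ascii_lowercase, 1):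
--         target_hit_miss_values[letter] = 0
--     for single_round in split_scores:
--         for target in single_round:
--             target_hit_miss_values[target] += 1
--     return target_hit_miss_values
-- ===== SOURCE B (Python) =====
-- import string
--
--
-- def dict_of_misses(raw_scores):
--     """Sort-then-scan: concatenate all scores, sort the characters, and walk the
--     sorted list once, adding each run's length to the zero-seeded letter table."""
--     result = dict.fromkeys(string.ascii_lowercase, 0)
--     chars = sorted(''.join(raw_scores))
--     i = 0
--     n = len(chars)
--     while i < n:
--         j = i + 1
--         while j < n and chars[j] == chars[i]:
--             j += 1
--         result[chars[i]] = result[chars[i]] + (j - i)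
--         i = j
--     return result
-- ===== Notes on version B (the rewrite author's own statement) =====
-- stated objective: alternative
-- what changed: A seeds a 26-key dict and increments an entry per character occurrence; B concatenates and SORTS all characters, then scans the sorted list once detecting runs of equal characters and adds each run's length to the zero-seeded table in one update per distinct letter.
import Mathlib
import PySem

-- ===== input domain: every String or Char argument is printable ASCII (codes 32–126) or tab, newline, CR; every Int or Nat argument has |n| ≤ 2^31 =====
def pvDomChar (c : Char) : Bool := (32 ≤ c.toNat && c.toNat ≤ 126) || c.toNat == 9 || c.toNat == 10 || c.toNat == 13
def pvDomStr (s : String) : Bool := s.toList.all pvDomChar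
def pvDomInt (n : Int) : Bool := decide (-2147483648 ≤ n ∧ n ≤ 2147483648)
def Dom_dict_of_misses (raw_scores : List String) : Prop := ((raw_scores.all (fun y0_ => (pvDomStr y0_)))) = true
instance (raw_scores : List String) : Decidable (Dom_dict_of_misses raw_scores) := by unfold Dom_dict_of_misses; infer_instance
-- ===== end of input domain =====

-- ===== PORT A =====
-- B replaces A's per-character dict increments by sort-then-run-scan: one table
-- update per run of equal characters in the sorted concatenation (objective: alternative).

-- string.ascii_lowercase (module constant, shared by both ports and Pre_)
def asciiLowercase : List Char := "abcdefghijklmnopqrstuvwxyz".toList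

-- a single-character string, the dict key the Python code uses
def pvKey (c : Char) : String := String.ofList [c]

-- loop body of A's `target_hit_miss_values[target] += 1`; Python raises KeyError
-- when the key is absent, so the `none` branch is unreachable inside Pre_
def stepA (d : PySem.Dict String Int) (target : Char) : PySem.Dict String Int :=
  match d.get? (pvKey target) with
  | some v => d.insert (pvKey target) (v + 1)
  | none => d

def dict_of_misses (raw_scores : List String) : List (String × Int) :=
  let split_scores := raw_scores.map (fun score => score.toList)
  -- `for index, letter in enumerate(string.ascii_lowercase, 1)` — index is unused
  let init := asciiLowercase.foldl (fun d letter => d.insert (pvKey letter) 0)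
    (PySem.Dict.empty : PySem.Dict String Int)
  let final := split_scores.foldl (fun d single_round => single_round.foldl stepA d) init
  final.items

-- ===== PORT B =====
-- B's outer while over indices i..j: structural recursion over the sorted list,
-- the inner `while chars[j] == chars[i]` is the run takeWhile/dropWhile split;
-- `result[chars[i]] = result[chars[i]] + (j - i)`: KeyError (none) skips, as in stepA
def runScan (d : PySem.Dict String Int) (chars : List Char) : PySem.Dict String Int :=
  match chars with
  | [] => d
  | c :: rest =>
      let run := rest.takeWhile (fun x => x == c)
      let rest' := rest.dropWhile (fun x => x == c)
      let d' := match d.get? (pvKey c) with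
        | some v => d.insert (pvKey c) (v + (1 + run.length))
        | none => d
      runScan d' rest'
termination_by chars.length
decreasing_by
  simp only [List.length_cons]
  exact Nat.lt_succ_of_le (List.length_dropWhile_le _ _)

def dict_of_misses_alt (raw_scores : List String) : List (String × Int) :=
  -- dict.fromkeys(string.ascii_lowercase, 0)
  let result := asciiLowercase.foldl (fun d letter => d.insert (pvKey letter) 0)
    (PySem.Dict.empty : PySem.Dict String Int)
  let chars := PySem.List.sorted (PySem.Str.join "" raw_scores).toList (fun x => x) false
  (runScan result chars).items

-- ===== PRECONDITION & SPEC =====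
-- Pre_ excludes exactly the inputs containing a character outside a-z, on which
-- both A and B raise KeyError (return no value).
def Pre_dict_of_misses (raw_scores : List String) : Prop :=
  (raw_scores.all (fun s => s.toList.all (fun c => asciiLowercase.contains c))) = true
instance (raw_scores : List String) : Decidable (Pre_dict_of_misses raw_scores) := by
  unfold Pre_dict_of_misses; infer_instance

def pvWitness_dict_of_misses : List String := (["abr", "brr"])

def Spec_dict_of_misses (raw_scores : List String) (out : List (String × Int)) : Prop := out = dict_of_misses_alt raw_scores
instance (raw_scores : List String) (out : List (String × Int)) : Decidable (Spec_dict_of_misses raw_scores out) := by unfold Spec_dict_of_misses; infer_instance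

-- ===== CLAIM (what is proved, stated in full; the proofs are below) =====
def Claim_equal_dict_of_misses : Prop := ∀ (raw_scores : List String), Dom_dict_of_misses raw_scores → Pre_dict_of_misses raw_scores → Spec_dict_of_misses raw_scores (dict_of_misses raw_scores)

-- ===== LEMMAS AND PROOFS =====

lemma pvKey_inj : Function.Injective pvKey := by
  intro a b h
  have := congrArg String.toList h
  simpa [pvKey] using this

lemma nodup_lower : asciiLowercase.Nodup := by decide

-- common machinery: in the canonical table, looking up letter t (t lowercase) finds f t
lemma get_table (f : Char → Int) (t : Char) (ht : t ∈ asciiLowercase) :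
    (PySem.Dict.mk (asciiLowercase.map (fun c => (pvKey c, f c)))).get? (pvKey t) = some (f t) := by
  set d := PySem.Dict.mk (asciiLowercase.map (fun c => (pvKey c, f c))) with hd
  have hnd : d.keys.Nodup := by
    have hkeys : d.keys = asciiLowercase.map pvKey := by simp [hd, PySem.Dict.keys]
    rw [hkeys]; exact nodup_lower.map pvKey_inj
  have hmem : (pvKey t, f t) ∈ d.items := by
    simp [hd]
    exact ⟨t, ht, rfl, rfl⟩
  exact PySem.Dict.get?_of_mem_items _ hmem hnd

-- inserting k + f t at letter t turns the table for f into the table for the bumped f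
lemma insert_table (f : Char → Int) (t : Char) (ht : t ∈ asciiLowercase) (k : Int) :
    (PySem.Dict.mk (asciiLowercase.map (fun c => (pvKey c, f c)))).insert (pvKey t) (f t + k)
      = PySem.Dict.mk (asciiLowercase.map (fun c => (pvKey c, if c = t then f c + k else f c))) := by
  set d := PySem.Dict.mk (asciiLowercase.map (fun c => (pvKey c, f c))) with hd
  have hget : d.get? (pvKey t) = some (f t) := get_table f t ht
  have hcont : d.contains (pvKey t) = true := by
    rw [PySem.Dict.contains_eq_isSome_get?, hget]; rfl
  apply PySem.Dict.ext
  rw [PySem.Dict.items_insert_of_contains _ _ hcont]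
  show (d.items).map _ = _
  rw [hd]
  show (List.map _ _).map _ = _
  rw [List.map_map]
  show _ = List.map (fun c => (pvKey c, if c = t then f c + k else f c)) asciiLowercase
  apply List.map_congr_left
  intro c hcmem
  by_cases hct : c = t
  · subst hct; simp
  · have hne : pvKey c ≠ pvKey t := fun hk => hct (pvKey_inj hk)
    simp [hne, hct]

-- invariant of A's increment loop: starting from a table assigning f c to each
-- letter c, processing characters cs (all lowercase) adds the count of c in cs
lemma foldA_items (cs : List Char) (h : ∀ c ∈ cs, c ∈ asciiLowercase) (f : Char → Int) :
    cs.foldl stepA (PySem.Dict.mk (asciiLowercase.map (fun c => (pvKey c, f c))))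
      = PySem.Dict.mk (asciiLowercase.map (fun c => (pvKey c, f c + cs.count c))) := by
  induction cs generalizing f with
  | nil => simp
  | cons t rest ih =>
    have ht : t ∈ asciiLowercase := h t (List.mem_cons_self)
    have hstep : stepA (PySem.Dict.mk (asciiLowercase.map (fun c => (pvKey c, f c)))) t
        = PySem.Dict.mk (asciiLowercase.map (fun c => (pvKey c, if c = t then f c + 1 else f c))) := by
      rw [stepA, get_table f t ht]
      exact insert_table f t ht 1
    rw [List.foldl_cons, hstep, ih (fun c hc => h c (List.mem_cons_of_mem _ hc))]
    congr 1
    apply List.map_congr_left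
    intro c hcmem
    by_cases hct : c = t
    · subst hct; simp; ring
    · simp [hct, Ne.symm hct]

-- invariant of B's run scan: each run of equal characters adds its length to
-- its letter's entry, so any cs (all lowercase) adds the count of c in cs
lemma runScan_items (cs : List Char) (h : ∀ c ∈ cs, c ∈ asciiLowercase) (f : Char → Int) :
    runScan (PySem.Dict.mk (asciiLowercase.map (fun c => (pvKey c, f c)))) cs
      = PySem.Dict.mk (asciiLowercase.map (fun c => (pvKey c, f c + cs.count c))) := by
  induction hn : cs.length using Nat.strong_induction_on generalizing cs f with
  | _ n ih =>
    match cs, hn with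
    | [], _ => simp [runScan]
    | t :: rest, hn =>
      have ht : t ∈ asciiLowercase := h t (List.mem_cons_self)
      rw [runScan]
      simp only [get_table f t ht]
      set run := rest.takeWhile (fun x => x == t) with hrun
      set rest' := rest.dropWhile (fun x => x == t) with hrest'
      rw [insert_table f t ht (1 + run.length)]
      have hsplit : rest = run ++ rest' := (List.takeWhile_append_dropWhile).symm
      have hlt : rest'.length < n := by
        rw [← hn, List.length_cons]
        exact Nat.lt_succ_of_le (List.length_dropWhile_le _ _)
      have hmem' : ∀ c ∈ rest', c ∈ asciiLowercase := by
        intro c hc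
        exact h c (List.mem_cons_of_mem _ (hsplit ▸ List.mem_append_right _ hc))
      rw [ih rest'.length hlt rest' hmem' _ rfl]
      refine congrArg PySem.Dict.mk (List.map_congr_left ?_)
      intro c hcmem
      have h1 : (t :: rest).count c = rest.count c + (if c = t then 1 else 0) := by
        rw [List.count_cons]
        by_cases hct : c = t
        · subst hct; simp
        · simp [hct, Ne.symm hct]
      have h2 : rest.count c = run.count c + rest'.count c := by
        conv_lhs => rw [hsplit]
        rw [List.count_append]
      have hrun_all : ∀ x ∈ run, x = t := fun x hx => by
        simpa using List.mem_takeWhile_imp hx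
      by_cases hct : c = t
      · subst hct
        have hruncount : run.count c = run.length :=
          List.count_eq_length.mpr (fun b hb => (hrun_all b hb).symm)
        simp only [h1, h2, hruncount, if_pos]
        push_cast
        ring_nf
      · have hruncount : run.count c = 0 :=
          List.count_eq_zero.mpr (fun hx => hct (hrun_all c hx))
        simp [hct, h1, h2, hruncount]

-- ''.join(raw_scores) concatenates: join with the empty separator is flatten
lemma join_nil_flatten (parts : List (List Char)) : PySem.Chars.join [] parts = parts.flatten := by
  induction parts with
  | nil => simp [PySem.Chars.join_nil]
  | cons a rest ih =>
    cases rest with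
    | nil => simp [PySem.Chars.join_singleton]
    | cons b r =>
      rw [PySem.Chars.join_cons_cons]
      simp only [List.flatten_cons]
      simp [ih]

-- ===== VERDICT (by name: the statement is the Claim_ definition above) =====
set_option maxRecDepth 8000 in
theorem dict_of_misses_spec : Claim_equal_dict_of_misses := by
  intro raw_scores _hdom hpre
  unfold Pre_dict_of_misses at hpre
  simp only [List.all_eq_true, List.contains_iff_mem] at hpre
  unfold Spec_dict_of_misses
  simp only [dict_of_misses, dict_of_misses_alt]
  have hinit : asciiLowercase.foldl (fun d letter => d.insert (pvKey letter) 0)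
      (PySem.Dict.empty : PySem.Dict String Int)
      = PySem.Dict.mk (asciiLowercase.map (fun c => (pvKey c, (0:Int)))) := by decide
  have hflat : (raw_scores.map (fun s => s.toList)).flatten
      = raw_scores.flatMap (fun s => s.toList) := by
    simp [List.flatMap_def]
  have hmemall : ∀ c ∈ raw_scores.flatMap (fun s => s.toList), c ∈ asciiLowercase := by
    intro c hc
    rw [List.mem_flatMap] at hc
    obtain ⟨s, hs, hcl⟩ := hc
    exact hpre s hs c hcl
  -- B's character list is a permutation of A's
  have hjoin : (PySem.Str.join "" raw_scores).toList = raw_scores.flatMap (fun s => s.toList) := by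
    simp [PySem.Str.toList_join, join_nil_flatten, List.flatMap_def]
  set chars := PySem.List.sorted (PySem.Str.join "" raw_scores).toList (fun x => x) false with hchars
  have hperm : chars.Perm (raw_scores.flatMap (fun s => s.toList)) := by
    rw [hchars, hjoin]
    exact PySem.List.sorted_perm _ _ _
  have hmemB : ∀ c ∈ chars, c ∈ asciiLowercase := fun c hc => hmemall c (hperm.mem_iff.mp hc)
  rw [hinit, ← List.foldl_flatten, hflat,
    foldA_items _ hmemall (fun _ => (0:Int)),
    runScan_items chars hmemB (fun _ => (0:Int))]
  refine congrArg PySem.Dict.items (congrArg PySem.Dict.mk (List.map_congr_left ?_))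
  intro c _
  rw [hperm.count_eq c]
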